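-- pv_equiv track=rewrite | github.com/xanoob/be434-fall-2021 | assignments/10_conserved/conserved.py | compare_pos
-- ===== SOURCE A (Python) =====
-- def compare_pos(lines, num_lines, num_pos):
--     """ compare each letter position in any number of lines """
--
--     letter_match = {}
--     for letter in range(num_pos):
--         compare = [lines[line][letter] for line in range(num_lines)]
--         if len(set(compare)) != 1:  # 1 if everything in set matches
--             letter_match[letter] = 'X'
--         else:
--             letter_match[letter] = '|'
--
--     return letter_match
-- ===== SOURCE B (Python) =====
-- def compare_pos(lines, num_lines, num_pos):
--     """ compare each letter position in any number of lines """
--     if num_lines <= 0 or num_pos <= 0: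
--         # no lines: nothing is conserved; no positions: empty table
--         return {p: 'X' for p in range(num_pos)}
--     ref = lines[0]
--     flags = ['|'] * num_pos
--     for line in range(1, num_lines):
--         row = lines[line]
--         for p in range(num_pos):
--             if row[p] != ref[p]:
--                 flags[p] = 'X'
--     return {p: flags[p] for p in range(num_pos)}
-- ===== Notes on version B (the rewrite author's own statement) =====
-- stated objective: alternative
-- what changed: Column-wise set construction (build each column list and test its set's size) is replaced by a row-major single pass that keeps a running conserved-flag table, comparing each further line against the first line and flipping flags on mismatch.
import Mathlib
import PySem

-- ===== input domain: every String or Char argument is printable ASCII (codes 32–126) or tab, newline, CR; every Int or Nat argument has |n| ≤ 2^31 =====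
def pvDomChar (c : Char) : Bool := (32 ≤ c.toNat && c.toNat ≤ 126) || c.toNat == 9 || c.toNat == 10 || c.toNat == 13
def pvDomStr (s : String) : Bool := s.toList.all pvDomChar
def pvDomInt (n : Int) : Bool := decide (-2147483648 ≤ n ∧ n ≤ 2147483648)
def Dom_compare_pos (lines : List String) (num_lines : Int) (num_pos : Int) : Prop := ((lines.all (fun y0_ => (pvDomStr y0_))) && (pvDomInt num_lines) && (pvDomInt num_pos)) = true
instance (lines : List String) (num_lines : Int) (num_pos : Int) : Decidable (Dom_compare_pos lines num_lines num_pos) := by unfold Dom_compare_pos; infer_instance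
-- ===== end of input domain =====

-- B replaces A's column-wise set construction by a row-major pass over a running conserved-flag table (alternative decomposition, same cost).


-- ===== PORT A =====
-- lines[line][letter]; the .getD defaults are unreachable under Pre_ (they are Python's IndexError)
def compare_pos (lines : List String) (num_lines : Int) (num_pos : Int) : List (Int × String) :=
  let letter_match : PySem.Dict Int String :=
    (PySem.List.pyRange 0 num_pos 1).foldl
      (fun (d : PySem.Dict Int String) letter =>
        let compare : List Char :=
          (PySem.List.pyRange 0 num_lines 1).map (fun line =>
            ((PySem.List.pyGet? lines line).bind (fun s => PySem.Str.pyGet? s letter)).getD ' ')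
        if (PySem.Set.ofList compare).length ≠ 1 then d.insert letter "X"
        else d.insert letter "|")
      PySem.Dict.empty
  letter_match.items

-- ===== PORT B =====
-- row-major pass: flags start all "|", each further line flips mismatching positions to "X"
def compare_pos_alt (lines : List String) (num_lines : Int) (num_pos : Int) : List (Int × String) :=
  if num_lines ≤ 0 ∨ num_pos ≤ 0 then
    ((PySem.List.pyRange 0 num_pos 1).foldl
      (fun (d : PySem.Dict Int String) p => d.insert p "X") PySem.Dict.empty).items
  else
    let ref : String := (PySem.List.pyGet? lines 0).getD ""
    let flags0 : List String := PySem.List.pyRepeat ["|"] num_pos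
    let flags : List String :=
      (PySem.List.pyRange 1 num_lines 1).foldl
        (fun fl line =>
          let row : String := (PySem.List.pyGet? lines line).getD ""
          (PySem.List.pyRange 0 num_pos 1).foldl
            (fun fl p =>
              if (PySem.Str.pyGet? row p).getD ' ' ≠ (PySem.Str.pyGet? ref p).getD ' '
              then fl.set p.toNat "X" else fl)
            fl)
        flags0
    ((PySem.List.pyRange 0 num_pos 1).foldl
      (fun (d : PySem.Dict Int String) p => d.insert p (PySem.List.pyGetD flags p "")) PySem.Dict.empty).items

-- ===== PRECONDITION & SPEC =====
-- Pre_ excludes exactly the inputs where Python A raises IndexError: with num_pos > 0, A reads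
-- lines[line][letter] for every line < num_lines, so num_lines must not exceed len(lines) and
-- each of those lines must be at least num_pos long.
def Pre_compare_pos (lines : List String) (num_lines : Int) (num_pos : Int) : Prop :=
  0 < num_pos → (num_lines ≤ (lines.length : Int) ∧
    ∀ s ∈ lines.take num_lines.toNat, num_pos ≤ (s.toList.length : Int))
instance (lines : List String) (num_lines : Int) (num_pos : Int) : Decidable (Pre_compare_pos lines num_lines num_pos) := by unfold Pre_compare_pos; infer_instance
def pvWitness_compare_pos : List String × Int × Int := (["AB", "AC"], 2, 2)

def Spec_compare_pos (lines : List String) (num_lines : Int) (num_pos : Int) (out : List (Int × String)) : Prop := out = compare_pos_alt lines num_lines num_pos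
instance (lines : List String) (num_lines : Int) (num_pos : Int) (out : List (Int × String)) : Decidable (Spec_compare_pos lines num_lines num_pos out) := by unfold Spec_compare_pos; infer_instance

-- ===== CLAIM (what is proved, stated in full; the proofs are below) =====
def Claim_equal_compare_pos : Prop := ∀ (lines : List String) (num_lines : Int) (num_pos : Int), Dom_compare_pos lines num_lines num_pos → Pre_compare_pos lines num_lines num_pos → Spec_compare_pos lines num_lines num_pos (compare_pos lines num_lines num_pos)

-- ===== LEMMAS AND PROOFS =====

-- the character A reads at (line, p), with ' ' where Python would raise (unreachable under Pre_)
def pvChAt (lines : List String) (line p : Int) : Char :=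
  ((PySem.List.pyGet? lines line).bind (fun s => PySem.Str.pyGet? s p)).getD ' '

-- B's per-cell read equals A's
lemma pvChAt_eq (lines : List String) (line p : Int) :
    (PySem.Str.pyGet? ((PySem.List.pyGet? lines line).getD "") p).getD ' ' = pvChAt lines line p := by
  unfold pvChAt
  cases h : PySem.List.pyGet? lines line with
  | none => simp [PySem.Str.pyGet?, PySem.Chars.pyGet?, PySem.List.pyGet?]
  | some s => simp

-- a fold inserting distinct fresh keys into an empty dict produces exactly the mapped items
lemma pvItems_foldl (np : Int) (f : Int → String) :
    ((PySem.List.pyRange 0 np 1).foldl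
      (fun (d : PySem.Dict Int String) p => d.insert p (f p)) PySem.Dict.empty).items
    = (PySem.List.pyRange 0 np 1).map (fun p => (p, f p)) := by
  rw [PySem.Dict.items_foldl_insert_fresh (k := fun a => a) (v := f)]
  · simp [PySem.Dict.empty]
  · intro a _; simp
  · simpa using PySem.List.nodup_pyRange_one 0 np

lemma pvLenFoldAdd (t : List Char) : ∀ s : List Char, s.length ≤ (t.foldl PySem.Set.add s).length := by
  induction t with
  | nil => intro s; simp
  | cons b t ih => intro s; refine le_trans ?_ (ih (PySem.Set.add s b))
                   simp [PySem.Set.add]; split <;> simp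

lemma pvSetLen_aux (t : List Char) : ∀ a : Char, (t.foldl PySem.Set.add [a]).length = 1 ↔ ∀ x ∈ t, x = a := by
  induction t with
  | nil => simp
  | cons b t ih =>
    intro a
    by_cases hb : b = a
    · subst hb; simpa [PySem.Set.add] using ih b
    · constructor
      · intro h
        exfalso
        have h2 : (2:Nat) ≤ (t.foldl PySem.Set.add [a, b]).length := by
          simpa using pvLenFoldAdd t [a, b]
        have hstep : PySem.Set.add [a] b = [a, b] := by
          simp [PySem.Set.add, PySem.Set.contains, hb]
        rw [List.foldl_cons, hstep] at h
        omega
      · intro h; exact absurd (h b (by simp)) hb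

-- set-size-1 test on a nonempty list = "every later element equals the first"
lemma pvSetLen_one (a : Char) (t : List Char) :
    (PySem.Set.ofList (a :: t)).length = 1 ↔ ∀ x ∈ t, x = a := by
  rw [PySem.Set.ofList_eq_foldl]
  have : PySem.Set.add [] a = [a] := by simp [PySem.Set.add, PySem.Set.contains]
  rw [List.foldl_cons, this]
  exact pvSetLen_aux t a

-- flag-setting folds keep the table's length
lemma pvSetFold_len {α : Type} (L : List α) (c : α → Prop) [DecidablePred c] (ix : α → Nat) :
    ∀ fl : List String, (L.foldl (fun fl p => if c p then fl.set (ix p) "X" else fl) fl).length = fl.length := by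
  induction L with
  | nil => intro fl; simp
  | cons x L ih => intro fl; rw [List.foldl_cons]; rw [ih]; split <;> simp

lemma pvInnerNat (c : Nat → Prop) [DecidablePred c] (n : Nat) (fl : List String) (k : Nat)
    (hn : n ≤ fl.length) :
    ((List.range n).foldl (fun fl j => if c j then fl.set j "X" else fl) fl).getD k ""
    = if k < n ∧ c k then "X" else fl.getD k "" := by
  induction n with
  | zero => simp
  | succ n ih =>
    rw [List.range_succ, List.foldl_append, List.foldl_cons, List.foldl_nil]
    have hlen : ((List.range n).foldl (fun fl j => if c j then fl.set j "X" else fl) fl).length = fl.length :=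
      pvSetFold_len (List.range n) c id fl
    have ihn := ih (by omega)
    by_cases hc : c n
    · rw [if_pos hc, List.getD_eq_getElem?_getD, List.getElem?_set]
      rcases Nat.lt_trichotomy k n with h | h | h
      · rw [if_neg (by omega), ← List.getD_eq_getElem?_getD, ihn]
        have : (k < n ∧ c k) ↔ (k < n + 1 ∧ c k) := by constructor <;> (rintro ⟨h1, h2⟩; exact ⟨by omega, h2⟩)
        simp only [this]
      · subst h; simp [hlen, show k < fl.length by omega, hc]
      · rw [if_neg (by omega), ← List.getD_eq_getElem?_getD, ihn,
          if_neg (by omega), if_neg (by omega)]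
    · rw [if_neg hc, ihn]
      have : (k < n ∧ c k) ↔ (k < n + 1 ∧ c k) := by
        constructor
        · rintro ⟨h1, h2⟩; exact ⟨by omega, h2⟩
        · rintro ⟨h1, h2⟩
          refine ⟨?_, h2⟩
          rcases Nat.lt_trichotomy k n with h | h | h
          · exact h
          · subst h; exact absurd h2 hc
          · omega
      simp only [this]

-- the inner (per-row) loop, pointwise on the flag table
lemma pvInner_getD (c : Int → Prop) [DecidablePred c] (np : Int) (fl : List String) (k : Nat)
    (hk : (k : Int) < np) (hlen : fl.length = np.toNat) :
    ((PySem.List.pyRange 0 np 1).foldl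
      (fun fl p => if c p then fl.set p.toNat "X" else fl) fl).getD k ""
    = if c k then "X" else fl.getD k "" := by
  rw [PySem.List.pyRange_one, List.foldl_map]
  simp only [zero_add, sub_zero, Int.toNat_natCast]
  rw [pvInnerNat (fun j => c (j : Int)) np.toNat fl k (by omega)]
  rw [if_congr (by constructor; · rintro ⟨_, h⟩; exact h
                   · intro h; exact ⟨by omega, h⟩) rfl rfl]

lemma pvInner_len (c : Int → Prop) [DecidablePred c] (np : Int) (fl : List String) :
    ((PySem.List.pyRange 0 np 1).foldl
      (fun fl p => if c p then fl.set p.toNat "X" else fl) fl).length = fl.length :=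
  pvSetFold_len _ c (fun p => p.toNat) fl

-- the outer loop over the remaining lines, pointwise on the flag table
lemma pvOuter_getD (cc : Int → Int → Prop) [∀ l p, Decidable (cc l p)] (L : List Int) (np : Int) (k : Nat)
    (hk : (k : Int) < np) :
    ∀ fl : List String, fl.length = np.toNat →
    ((L.foldl (fun fl line =>
        (PySem.List.pyRange 0 np 1).foldl
          (fun fl p => if cc line p then fl.set p.toNat "X" else fl) fl) fl).getD k "")
    = if ∃ line ∈ L, cc line (k : Int) then "X" else fl.getD k "" := by
  induction L with
  | nil => intro fl _; simp
  | cons line L ih =>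
    intro fl hlen
    rw [List.foldl_cons, ih _ (by rw [pvInner_len]; exact hlen)]
    by_cases hex : ∃ l ∈ L, cc l (k : Int)
    · obtain ⟨l, hl, hcl⟩ := hex
      rw [if_pos ⟨l, hl, hcl⟩, if_pos ⟨l, List.mem_cons_of_mem _ hl, hcl⟩]
    · rw [if_neg hex, pvInner_getD (cc line) np fl k hk hlen]
      by_cases h1 : cc line (k : Int)
      · rw [if_pos h1, if_pos ⟨line, by simp, h1⟩]
      · rw [if_neg h1, if_neg (by rintro ⟨l, hl, h⟩; rcases List.mem_cons.mp hl with rfl | hl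
                                  · exact h1 h
                                  · exact hex ⟨l, hl, h⟩)]

-- ===== VERDICT (by name: the statement is the Claim_ definition above) =====
theorem compare_pos_spec : Claim_equal_compare_pos := by
  intro lines nl np _ _
  unfold Spec_compare_pos compare_pos compare_pos_alt
  by_cases h0 : nl ≤ 0 ∨ np ≤ 0
  · rw [if_pos h0]
    simp only []
    apply congrArg PySem.Dict.items
    apply PySem.List.foldl_congr_mem
    intro d letter hmem
    by_cases hnp : np ≤ 0
    · exact absurd hmem (by rw [PySem.List.pyRange_one_eq_nil (by omega)]; simp)
    · have hnl : nl ≤ 0 := h0.resolve_right hnp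
      rw [PySem.List.pyRange_one_eq_nil (by omega), List.map_nil]
      rw [if_pos (by simp [PySem.Set.ofList])]
  · rw [if_neg h0]
    push_neg at h0
    obtain ⟨hnl, hnp⟩ := h0
    simp only []
    have hstep : (fun (d : PySem.Dict Int String) letter =>
        if (PySem.Set.ofList ((PySem.List.pyRange 0 nl 1).map (fun line =>
              pvChAt lines line letter))).length ≠ 1
        then d.insert letter "X" else d.insert letter "|")
        = fun (d : PySem.Dict Int String) letter => d.insert letter
            (if (PySem.Set.ofList ((PySem.List.pyRange 0 nl 1).map (fun line =>
              pvChAt lines line letter))).length ≠ 1 then "X" else "|") := by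
      funext d letter; split <;> rfl
    rw [show (fun (d : PySem.Dict Int String) letter =>
        if (PySem.Set.ofList ((PySem.List.pyRange 0 nl 1).map (fun line =>
          ((PySem.List.pyGet? lines line).bind (fun s => PySem.Str.pyGet? s letter)).getD ' '))).length ≠ 1
        then d.insert letter "X" else d.insert letter "|") = _ from hstep]
    rw [pvItems_foldl, pvItems_foldl]
    apply List.map_congr_left
    intro p hp
    obtain ⟨hp0, hpn⟩ := (PySem.List.mem_pyRange_one).mp hp
    refine Prod.ext rfl ?_
    simp only []
    -- B side: evaluate the flag table at p
    rw [PySem.List.pyGetD_of_nonneg _ _ hp0]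
    have hkp : ((p.toNat : Int)) < np := by omega
    rw [pvOuter_getD (fun line q =>
          (PySem.Str.pyGet? ((PySem.List.pyGet? lines line).getD "") q).getD ' '
          ≠ (PySem.Str.pyGet? ((PySem.List.pyGet? lines 0).getD "") q).getD ' ')
        (PySem.List.pyRange 1 nl 1) np p.toNat hkp _
        (by rw [PySem.List.pyRepeat_singleton]; simp)]
    have hrepl : (PySem.List.pyRepeat ["|"] np).getD p.toNat "" = "|" := by
      rw [PySem.List.pyRepeat_singleton, List.getD_eq_getElem?_getD,
        List.getElem?_replicate, if_pos (by omega)]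
      rfl
    rw [hrepl]
    -- A side: head/tail split of the column
    rw [PySem.List.pyRange_one_cons hnl, List.map_cons,
      show ((0:Int) + 1) = 1 by norm_num]
    have hne : ((PySem.Set.ofList (pvChAt lines 0 p ::
        (PySem.List.pyRange 1 nl 1).map (fun line => pvChAt lines line p))).length ≠ 1)
        ↔ ∃ line ∈ PySem.List.pyRange 1 nl 1, pvChAt lines line p ≠ pvChAt lines 0 p := by
      rw [Ne, pvSetLen_one]
      push_neg
      constructor
      · rintro ⟨x, hx, hxa⟩
        obtain ⟨line, hline, rfl⟩ := List.mem_map.mp hx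
        exact ⟨line, hline, hxa⟩
      · rintro ⟨line, hline, h⟩
        exact ⟨_, List.mem_map_of_mem hline, h⟩
    have hcond : (∃ line ∈ PySem.List.pyRange 1 nl 1,
        (PySem.Str.pyGet? ((PySem.List.pyGet? lines line).getD "") ((p.toNat : Int))).getD ' '
        ≠ (PySem.Str.pyGet? ((PySem.List.pyGet? lines 0).getD "") ((p.toNat : Int))).getD ' ')
        ↔ ∃ line ∈ PySem.List.pyRange 1 nl 1, pvChAt lines line p ≠ pvChAt lines 0 p := by
      simp only [pvChAt_eq, Int.toNat_of_nonneg hp0]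
    rw [if_congr hne rfl rfl, if_congr hcond rfl rfl]
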